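-- pv_equiv track=rewrite | github.com/BAAL-NF/nopeak-utils | nopeak_utils/nopeak.py | _strip_left_edge
-- ===== SOURCE A (Python) =====
-- def _strip_left_edge(pfm):
--     nonzero = False
--     stripped_pfm = []
--     for row in pfm:
--         if sum(row[:4]):
--             nonzero = True
--         if nonzero:
--             stripped_pfm.append(row)
--
--     return stripped_pfm
-- ===== SOURCE B (Python) =====
-- def _strip_left_edge(pfm):
--     for i, row in enumerate(pfm):
--         if sum(row[:4]):
--             return list(pfm[i:])
--     return []
-- ===== Notes on version B (the rewrite author's own statement) =====
-- stated objective: simpler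
-- what changed: Replaces the flag-plus-conditional-append loop with finding the first row whose leading 4-entry sum is nonzero and returning the tail slice in one step.
import Mathlib
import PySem

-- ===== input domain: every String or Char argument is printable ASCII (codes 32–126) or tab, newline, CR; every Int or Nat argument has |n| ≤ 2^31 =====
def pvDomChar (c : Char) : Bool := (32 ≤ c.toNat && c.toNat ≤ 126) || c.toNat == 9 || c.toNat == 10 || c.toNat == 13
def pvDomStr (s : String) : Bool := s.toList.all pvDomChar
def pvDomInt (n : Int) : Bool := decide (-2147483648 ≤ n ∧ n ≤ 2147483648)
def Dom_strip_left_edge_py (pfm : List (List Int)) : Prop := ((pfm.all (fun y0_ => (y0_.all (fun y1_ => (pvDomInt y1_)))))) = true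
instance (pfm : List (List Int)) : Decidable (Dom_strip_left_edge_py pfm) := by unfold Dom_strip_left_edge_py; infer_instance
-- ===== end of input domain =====

-- B replaces A's flag-plus-conditional-append loop by locating the first row with a
-- nonzero leading-4 sum and returning the tail slice in one step (objective: simpler).


-- ===== PORT A =====
-- the body of A's for-loop: update the flag, then conditionally append the row
def pvStepA (st : Bool × List (List Int)) (row : List Int) : Bool × List (List Int) :=
  let nonzero := if (PySem.List.slice row none (some 4)).sum ≠ 0 then true else st.1
  (nonzero, if nonzero then st.2 ++ [row] else st.2)

def strip_left_edge_py (pfm : List (List Int)) : List (List Int) :=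
  (pfm.foldl pvStepA (false, [])).2

-- ===== PORT B =====
def strip_left_edge_py_alt (pfm : List (List Int)) : List (List Int) :=
  match pfm.findIdx? (fun row => decide ((PySem.List.slice row none (some 4)).sum ≠ 0)) with
  | some i => pfm.drop i
  | none => []

-- ===== PRECONDITION & SPEC =====
def Spec_strip_left_edge_py (pfm : List (List Int)) (out : List (List Int)) : Prop := out = strip_left_edge_py_alt pfm
instance (pfm : List (List Int)) (out : List (List Int)) : Decidable (Spec_strip_left_edge_py pfm out) := by unfold Spec_strip_left_edge_py; infer_instance

-- ===== CLAIM (what is proved, stated in full; the proofs are below) =====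
def Claim_equal_strip_left_edge_py : Prop := ∀ (pfm : List (List Int)), Dom_strip_left_edge_py pfm → Spec_strip_left_edge_py pfm (strip_left_edge_py pfm)

-- ===== LEMMAS AND PROOFS =====

-- once the flag is true, A appends every remaining row
lemma foldl_stepA_true (pfm : List (List Int)) (acc : List (List Int)) :
    (pfm.foldl pvStepA (true, acc)).2 = acc ++ pfm := by
  induction pfm generalizing acc with
  | nil => simp
  | cons r rs ih =>
    simp only [List.foldl_cons, pvStepA]
    simp only [ite_self]
    rw [ih]
    simp

-- from a false flag, A's loop produces the accumulator followed by B's result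
lemma foldl_stepA_false (pfm : List (List Int)) (acc : List (List Int)) :
    (pfm.foldl pvStepA (false, acc)).2 = acc ++ strip_left_edge_py_alt pfm := by
  induction pfm generalizing acc with
  | nil => simp [strip_left_edge_py_alt]
  | cons r rs ih =>
    by_cases h : (PySem.List.slice r none (some 4)).sum ≠ 0
    · simp only [List.foldl_cons, pvStepA, if_pos h]
      rw [foldl_stepA_true]
      simp [strip_left_edge_py_alt, List.findIdx?_cons, h]
    · simp only [List.foldl_cons, pvStepA, if_neg h]
      rw [ih]
      have h0 : (PySem.List.slice r none (some 4)).sum = 0 := not_not.mp h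
      simp only [strip_left_edge_py_alt, List.findIdx?_cons, h0, decide_not, decide_true,
        Bool.not_true, Bool.false_eq_true, if_false]
      cases List.findIdx? (fun row => !decide ((PySem.List.slice row none (some 4)).sum = 0)) rs <;> simp

-- ===== VERDICT (by name: the statement is the Claim_ definition above) =====
theorem strip_left_edge_py_spec : Claim_equal_strip_left_edge_py := by
  intro pfm _
  unfold Spec_strip_left_edge_py strip_left_edge_py
  simpa using foldl_stepA_false pfm []
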